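-- pv_equiv track=rewrite | github.com/SamsonCodes/Random-Forest | forest.py | combine_votes
-- ===== SOURCE A (Python) =====
-- def combine_votes(votes):
--     """Combines the votes into a single dictionary"""
--     votecounts = {}  # a dictionary of label -> count.
--     for vote in votes:
--         for key in vote:
--             if key not in votecounts:
--                 votecounts[key] = 0
--             votecounts[key] += vote[key]
--     return votecounts
-- ===== SOURCE B (Python) =====
-- def combine_votes(votes):
--     """Combines the votes into a single dictionary"""
--     keys = dict.fromkeys(k for vote in votes for k in vote)
--     return {k: sum(vote.get(k, 0) for vote in votes) for k in keys}
-- ===== Notes on version B (the rewrite author's own statement) =====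
-- stated objective: alternative
-- what changed: B first collects the key universe in first-encounter order (dict.fromkeys) and then builds the result with a per-key aggregation pass (sum of vote.get(k,0)), instead of A's per-entry accumulation into a mutable counter dict.
import Mathlib
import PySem

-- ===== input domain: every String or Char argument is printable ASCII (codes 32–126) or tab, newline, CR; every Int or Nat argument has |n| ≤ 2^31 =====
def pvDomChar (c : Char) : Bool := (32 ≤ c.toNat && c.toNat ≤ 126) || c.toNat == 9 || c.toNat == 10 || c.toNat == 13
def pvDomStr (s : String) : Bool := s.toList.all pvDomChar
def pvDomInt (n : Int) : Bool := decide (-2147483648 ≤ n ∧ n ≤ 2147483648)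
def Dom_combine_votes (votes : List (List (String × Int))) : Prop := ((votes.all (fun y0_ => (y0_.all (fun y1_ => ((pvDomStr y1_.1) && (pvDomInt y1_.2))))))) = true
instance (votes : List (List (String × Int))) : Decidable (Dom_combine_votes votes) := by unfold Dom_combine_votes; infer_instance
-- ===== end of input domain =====

-- B replaces A's per-entry accumulation into a mutable counter dict by the opposite
-- decomposition: key universe first (first-encounter order), then one sum per key.

-- ===== PORT A =====
-- per-entry accumulation: for vote in votes: for key in vote: init-if-absent, then add vote[key]
def combine_votes (votes : List (List (String × Int))) : List (String × Int) :=
  (votes.foldl (fun votecounts vote =>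
      vote.foldl (fun votecounts kv =>
          let d1 := if votecounts.contains kv.1 then votecounts else votecounts.insert kv.1 0
          d1.insert kv.1 (d1.getD kv.1 0 + (PySem.Dict.mk vote).getD kv.1 0))
        votecounts)
    PySem.Dict.empty).items

-- ===== PORT B =====
def combine_votes_alt (votes : List (List (String × Int))) : List (String × Int) :=
  let keys := PySem.List.dedup ((votes.map (fun vote => vote.map (·.1))).flatten)
  keys.map (fun k => (k, (votes.map (fun vote => (PySem.Dict.mk vote).getD k 0)).sum))

-- ===== PRECONDITION & SPEC =====
-- Pre_ restricts to association lists that actually represent Python dicts: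
-- each vote has pairwise-distinct keys (a Python dict can never hold a duplicate key),
-- so it excludes no input the Python function ever receives.
def Pre_combine_votes (votes : List (List (String × Int))) : Prop :=
  ∀ vote ∈ votes, (vote.map (·.1)).Nodup
instance (votes : List (List (String × Int))) : Decidable (Pre_combine_votes votes) := by unfold Pre_combine_votes; infer_instance

def pvWitness_combine_votes : (List (List (String × Int))) := [[("a", 1), ("b", 2)], [("a", 3)]]

def Spec_combine_votes (votes : List (List (String × Int))) (out : List (String × Int)) : Prop := out = combine_votes_alt votes
instance (votes : List (List (String × Int))) (out : List (String × Int)) : Decidable (Spec_combine_votes votes out) := by unfold Spec_combine_votes; infer_instance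

-- ===== CLAIM (what is proved, stated in full; the proofs are below) =====
def Claim_equal_combine_votes : Prop := ∀ (votes : List (List (String × Int))), Dom_combine_votes votes → Pre_combine_votes votes → Spec_combine_votes votes (combine_votes votes)

-- ===== LEMMAS AND PROOFS =====

-- the uniform insert-with-add step A's branchy loop body amounts to
def cvStep (d : PySem.Dict String Int) (p : String × Int) : PySem.Dict String Int :=
  d.insert p.1 (d.getD p.1 0 + p.2)

-- the (key, looked-up value) stream one vote contributes
def cvPairs (vote : List (String × Int)) : List (String × Int) :=
  vote.map (fun kv => (kv.1, (PySem.Dict.mk vote).getD kv.1 0))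

theorem cv_stepA_eq (d : PySem.Dict String Int) (vote : List (String × Int)) (kv : String × Int) :
    (let d1 := if d.contains kv.1 then d else d.insert kv.1 0
     d1.insert kv.1 (d1.getD kv.1 0 + (PySem.Dict.mk vote).getD kv.1 0))
    = cvStep d (kv.1, (PySem.Dict.mk vote).getD kv.1 0) := by
  by_cases hc : d.contains kv.1 = true
  · simp [cvStep, hc]
  · simp only [Bool.not_eq_true] at hc
    simp [cvStep, hc, PySem.Dict.getD_insert_self, PySem.Dict.insert_insert_self,
      PySem.Dict.getD_of_not_contains d 0 hc]

theorem cv_foldl_flatMap (l : List (List (String × Int))) (f : List (String × Int) → List (String × Int))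
    (init : PySem.Dict String Int) :
    l.foldl (fun d v => (f v).foldl cvStep d) init = (l.flatMap f).foldl cvStep init := by
  induction l generalizing init with
  | nil => rfl
  | cons v l ih => simp [List.flatMap_cons, List.foldl_append, ih]

theorem cv_getD_foldl (l : List (String × Int)) (d : PySem.Dict String Int) (k : String) :
    (l.foldl cvStep d).getD k 0 = d.getD k 0 + ((l.filter (fun p => p.1 == k)).map (·.2)).sum := by
  induction l generalizing d with
  | nil => simp
  | cons p l ih =>
    simp only [List.foldl_cons, ih, List.filter_cons]
    by_cases hp : p.1 = k
    · simp [cvStep, hp, PySem.Dict.getD_insert_self]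
      ring
    · simp [cvStep, PySem.Dict.getD_insert_of_ne d _ 0 (fun h => hp h.symm), hp]

theorem cv_filter_map_sum (l : List (String × Int)) (g : String → Int) (k : String) :
    (((l.map (fun kv => (kv.1, g kv.1))).filter (fun p => p.1 == k)).map (·.2)).sum
      = ((l.map (·.1)).count k : Int) * g k := by
  induction l with
  | nil => simp
  | cons kv l ih =>
    simp only [List.map_cons, List.filter_cons, List.count_cons]
    by_cases hk : kv.1 = k
    · simp [hk, ih]
      ring
    · simp [ih, fun h => hk h]

theorem cv_pervote (vote : List (String × Int)) (h : (vote.map (·.1)).Nodup) (k : String) :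
    (((cvPairs vote).filter (fun p => p.1 == k)).map (·.2)).sum = (PySem.Dict.mk vote).getD k 0 := by
  have := cv_filter_map_sum vote (fun s => (PySem.Dict.mk vote).getD s 0) k
  rw [cvPairs, this]
  by_cases hm : k ∈ vote.map (·.1)
  · rw [List.count_eq_one_of_mem h hm]
    simp
  · rw [List.count_eq_zero_of_not_mem hm]
    have hc : (PySem.Dict.mk vote).contains k = false := by
      simp [PySem.Dict.contains_mk]
      intro a b hab
      exact fun hk => hm (by simpa [hk] using List.mem_map_of_mem (f := (·.1)) hab)
    simp [PySem.Dict.getD_of_not_contains _ 0 hc]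

theorem cv_total (votes : List (List (String × Int))) (h : ∀ vote ∈ votes, (vote.map (·.1)).Nodup) (k : String) :
    (((votes.flatMap cvPairs).filter (fun p => p.1 == k)).map (·.2)).sum
      = (votes.map (fun vote => (PySem.Dict.mk vote).getD k 0)).sum := by
  induction votes with
  | nil => simp
  | cons v votes ih =>
    simp only [List.flatMap_cons, List.filter_append, List.map_append, List.sum_append, List.map_cons, List.sum_cons]
    rw [cv_pervote v (h v (by simp)) k, ih (fun w hw => h w (by simp [hw]))]

-- ===== VERDICT (by name: the statement is the Claim_ definition above) =====
theorem combine_votes_spec : Claim_equal_combine_votes := by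
  intro votes _ hpre
  unfold Spec_combine_votes combine_votes combine_votes_alt
  have hfun : ∀ vote : List (String × Int),
      (fun (votecounts : PySem.Dict String Int) (kv : String × Int) =>
        let d1 := if votecounts.contains kv.1 then votecounts else votecounts.insert kv.1 0
        d1.insert kv.1 (d1.getD kv.1 0 + (PySem.Dict.mk vote).getD kv.1 0))
      = fun d kv => cvStep d (kv.1, (PySem.Dict.mk vote).getD kv.1 0) := by
    intro vote; funext d kv; exact cv_stepA_eq d vote kv
  have hinner : ∀ (vote : List (String × Int)) (d : PySem.Dict String Int),
      vote.foldl (fun votecounts kv =>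
        let d1 := if votecounts.contains kv.1 then votecounts else votecounts.insert kv.1 0
        d1.insert kv.1 (d1.getD kv.1 0 + (PySem.Dict.mk vote).getD kv.1 0)) d
      = (cvPairs vote).foldl cvStep d := by
    intro vote d
    rw [hfun vote, cvPairs, List.foldl_map]
  simp only [hinner]
  rw [cv_foldl_flatMap votes cvPairs PySem.Dict.empty]
  set D := (votes.flatMap cvPairs).foldl cvStep PySem.Dict.empty with hD
  have hnd : D.keys.Nodup := by
    rw [hD]
    exact PySem.Dict.nodup_keys_foldl_insert_key (votes.flatMap cvPairs) Prod.fst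
      (fun d x => d.getD x.1 0 + x.2) PySem.Dict.empty PySem.Dict.nodup_keys_empty
  have hkeys : D.keys = PySem.List.dedup ((votes.map (fun vote => vote.map (·.1))).flatten) := by
    rw [hD]
    have h1 : (List.foldl cvStep PySem.Dict.empty (votes.flatMap cvPairs)).keys
        = PySem.Set.update (PySem.Dict.empty : PySem.Dict String Int).keys ((votes.flatMap cvPairs).map Prod.fst) :=
      PySem.Dict.keys_foldl_insert_key (votes.flatMap cvPairs) Prod.fst
        (fun d x => d.getD x.1 0 + x.2) PySem.Dict.empty
    rw [h1, PySem.Dict.keys_empty, PySem.Set.update_nil_left, PySem.List.dedup_eq_ofList]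
    congr 1
    simp [List.flatMap_def, cvPairs, List.map_map, Function.comp_def]
  rw [PySem.Dict.items_eq_map_keys D hnd 0, hkeys]
  apply List.map_congr_left
  intro k _
  rw [hD, cv_getD_foldl, PySem.Dict.getD_empty, cv_total votes hpre k]
  ring_nf
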